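-- pv_equiv track=rewrite | github.com/dusterbloom/slowcat | server/memory/spacy_fact_extractor.py | _clean_np
-- ===== SOURCE A (Python) =====
-- def _clean_np(text: str) -> str:
--     """Lightly normalize noun phrase text by removing leading determiners/possessives."""
--     if not text:
--         return text
--     stripped = text.strip()
--     lowers = stripped.lower()
--     for art in ("my ", "the ", "a ", "an ", "this ", "that ", "these ", "those "):
--         if lowers.startswith(art):
--             return stripped[len(art):]
--     return stripped
-- ===== SOURCE B (Python) =====
-- _DETS = frozenset({"my", "the", "a", "an", "this", "that", "these", "those"})
--
-- def _clean_np(text: str) -> str: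
--     """Lightly normalize noun phrase text by removing leading determiners/possessives."""
--     s = text.strip()
--     i = s.find(' ')
--     if i != -1 and s[:i].lower() in _DETS:
--         return s[i + 1:]
--     return s
-- ===== Notes on version B (the rewrite author's own statement) =====
-- stated objective: idiomatic
-- what changed: Replaces the eight sequential lowercased-prefix startswith scans with a single find-first-space token extraction and one frozenset membership test.
import Mathlib
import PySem

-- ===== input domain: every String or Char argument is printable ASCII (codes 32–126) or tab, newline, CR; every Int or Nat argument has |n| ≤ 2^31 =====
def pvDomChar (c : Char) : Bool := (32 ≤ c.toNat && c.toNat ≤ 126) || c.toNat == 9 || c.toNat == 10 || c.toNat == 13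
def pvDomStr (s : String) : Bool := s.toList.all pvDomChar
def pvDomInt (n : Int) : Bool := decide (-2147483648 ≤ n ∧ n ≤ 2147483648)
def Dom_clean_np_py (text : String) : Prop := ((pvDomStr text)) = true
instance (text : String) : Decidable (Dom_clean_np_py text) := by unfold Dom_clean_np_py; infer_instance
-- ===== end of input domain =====

-- B replaces A's eight sequential lowercased-prefix startswith scans by extracting the
-- leading token once (first-space search) and testing it against a set of determiners.

-- ===== PORT A =====
def clean_np_py (text : String) : String :=
  if text == "" then text
  else
    let stripped := PySem.Str.strip text
    let lowers := PySem.Str.lower stripped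
    if PySem.Str.startswith lowers "my " then PySem.Str.slice stripped (some 3) none
    else if PySem.Str.startswith lowers "the " then PySem.Str.slice stripped (some 4) none
    else if PySem.Str.startswith lowers "a " then PySem.Str.slice stripped (some 2) none
    else if PySem.Str.startswith lowers "an " then PySem.Str.slice stripped (some 3) none
    else if PySem.Str.startswith lowers "this " then PySem.Str.slice stripped (some 5) none
    else if PySem.Str.startswith lowers "that " then PySem.Str.slice stripped (some 5) none
    else if PySem.Str.startswith lowers "these " then PySem.Str.slice stripped (some 6) none
    else if PySem.Str.startswith lowers "those " then PySem.Str.slice stripped (some 6) none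
    else stripped

-- ===== PORT B =====
-- the frozenset _DETS of Source B
def pvDets : PySem.Set String :=
  PySem.Set.ofList ["my", "the", "a", "an", "this", "that", "these", "those"]

def clean_np_py_alt (text : String) : String :=
  let s := PySem.Str.strip text
  let i := PySem.Str.find s " "
  if i != -1 && PySem.Set.contains pvDets (PySem.Str.lower (PySem.Str.slice s none (some i))) then
    PySem.Str.slice s (some (i + 1)) none
  else s

-- ===== PRECONDITION & SPEC =====
def Spec_clean_np_py (text : String) (out : String) : Prop := out = clean_np_py_alt text
instance (text : String) (out : String) : Decidable (Spec_clean_np_py text out) := by unfold Spec_clean_np_py; infer_instance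

-- ===== CLAIM (what is proved, stated in full; the proofs are below) =====
def Claim_equal_clean_np_py : Prop := ∀ (text : String), Dom_clean_np_py text → Spec_clean_np_py text (clean_np_py text)

-- ===== LEMMAS AND PROOFS =====

-- Python's str.lower maps a char to ' ' exactly when it is ' '.
theorem pvLowerChar_eq_space_iff (c : Char) : PySem.Chars.lowerChar c = ' ' ↔ c = ' ' := by
  unfold PySem.Chars.lowerChar PySem.Chars.isupper
  constructor
  · intro h
    split_ifs at h with hu
    · exfalso
      simp only [Bool.and_eq_true, decide_eq_true_eq] at hu
      have h1 : ('A' : Char).toNat ≤ c.toNat := hu.1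
      have h2 : c.toNat ≤ ('Z' : Char).toNat := hu.2
      have hA : ('A' : Char).toNat = 65 := rfl
      have hZ : ('Z' : Char).toNat = 90 := rfl
      have hS : (' ' : Char).toNat = 32 := rfl
      have hv : (c.toNat + 32).isValidChar := Or.inl (by omega)
      have htn : (Char.ofNat (c.toNat + 32)).toNat = c.toNat + 32 := by
        rw [Char.ofNat, dif_pos hv]; rfl
      have := congrArg Char.toNat h
      rw [htn] at this
      omega
    · exact h
  · intro h; subst h; rfl

theorem pvSingleton_prefix_iff (c : Char) (xs : List Char) : [c] <+: xs ↔ xs[0]? = some c := by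
  cases xs with
  | nil => simp
  | cons a t => simp [List.cons_prefix_cons, eq_comm]

theorem pvMem_iff_singleton_infix (c : Char) (l : List Char) : c ∈ l ↔ [c] <:+: l := by
  constructor
  · intro h
    obtain ⟨s, t, rfl⟩ := List.append_of_mem h
    exact ⟨s, t, by simp⟩
  · rintro ⟨s, t, rfl⟩; simp

-- A's prefix tests are all false when the stripped text has no space.
theorem pvStartswith_det_none (l w : List Char) (hsp : ' ' ∉ l) :
    PySem.Chars.startswith (PySem.Chars.lower l) (w ++ [' ']) = false := by
  rw [← Bool.not_eq_true, PySem.Chars.startswith_iff]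
  intro h
  have hmem : (' ' : Char) ∈ PySem.Chars.lower l := h.subset (by simp)
  have : ∃ c ∈ l, PySem.Chars.lowerChar c = ' ' := by
    simpa [PySem.Chars.lower] using hmem
  obtain ⟨c, hc, hce⟩ := this
  exact hsp ((pvLowerChar_eq_space_iff c).mp hce ▸ hc)

-- When the first space of l is at position n, A's test for the determiner w (space-free)
-- succeeds iff the lowercased leading token equals w.
theorem pvStartswith_det_iff (l w : List Char) (hw : ∀ c ∈ w, c ≠ ' ') (n : ℕ)
    (hn : l[n]? = some ' ') (hmin : ∀ i, i < n → l[i]? ≠ some ' ') :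
    (PySem.Chars.startswith (PySem.Chars.lower l) (w ++ [' ']) = true ↔
      PySem.Chars.lower (l.take n) = w) ∧
    (PySem.Chars.lower (l.take n) = w → n = w.length) := by
  have hlen : n < l.length := by
    by_contra h
    simp [List.getElem?_eq_none (le_of_not_gt h)] at hn
  have hln : l[n]'hlen = ' ' := by
    have := hn; rw [List.getElem?_eq_getElem hlen] at this; exact Option.some_injective _ this
  have hdir : PySem.Chars.lower (l.take n) = w → n = w.length := by
    intro h
    have := congrArg List.length h
    simpa [PySem.Chars.lower, Nat.min_eq_left (le_of_lt hlen)] using this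
  refine ⟨?_, hdir⟩
  rw [PySem.Chars.startswith_iff]
  constructor
  · intro h
    set m := w.length with hm
    have htake : (w ++ [' ']) = (PySem.Chars.lower l).take (m + 1) := by
      have := List.prefix_iff_eq_take.mp h
      simpa using this
    have htake' : (w ++ [' ']) = PySem.Chars.lower (l.take (m + 1)) := by
      rw [htake]; simp [PySem.Chars.lower, List.map_take]
    -- position m of l is a space
    have hmlen : m + 1 ≤ l.length := by
      have := congrArg List.length htake'
      simp [PySem.Chars.lower] at this
      omega
    have hlm : l[m]? = some ' ' := by
      have := congrArg (fun t => t[m]?) htake'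
      simp [PySem.Chars.lower, hm] at this
      rw [List.getElem?_eq_getElem (by omega : m < l.length)] at this ⊢
      simp at this ⊢
      exact (pvLowerChar_eq_space_iff _).mp this
    -- positions below m are non-spaces
    have hbelow : ∀ i, i < m → l[i]? ≠ some ' ' := by
      intro i hi hsp
      have hil : i < l.length := by omega
      have : (PySem.Chars.lower (l.take (m + 1)))[i]? = some (w[i]'hi) := by
        rw [← htake']
        simp [List.getElem?_append_left hi]
      simp [PySem.Chars.lower, List.getElem?_take_of_lt (Nat.lt_succ_of_lt hi),
        List.getElem?_eq_getElem hil] at this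
      rw [List.getElem?_eq_getElem hil] at hsp
      have hsp' : l[i]'hil = ' ' := by simpa using hsp
      rw [hsp'] at this
      exact hw _ (List.getElem_mem hi) (by simpa [pvLowerChar_eq_space_iff] using this.symm)
    have hnm : n = m := by
      have h1 : ¬ m < n := fun hc => hmin m hc hlm
      have h2 : ¬ n < m := fun hc => hbelow n hc hn
      omega
    -- the leading token equals w
    have hto := congrArg (List.take m) htake'
    rw [List.take_append_of_le_length (le_refl m), List.take_length] at hto
    rw [hnm, hto]
    simp [PySem.Chars.lower, List.map_take, List.take_take]
  · intro h
    have hnm : n = w.length := hdir h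
    have hstep : l.take (n + 1) = l.take n ++ [' '] := by
      rw [List.take_add_one, hn]; rfl
    have : PySem.Chars.lower (l.take (n + 1)) = w ++ [' '] := by
      rw [hstep]
      simp only [PySem.Chars.lower, List.map_append] at h ⊢
      rw [h]; rfl
    calc w ++ [' '] = (PySem.Chars.lower l).take (n + 1) := by
          rw [← this]; simp [PySem.Chars.lower, List.map_take]
      _ <+: PySem.Chars.lower l := List.take_prefix _ _
  
-- Core equality, for the stripped string s.
set_option maxRecDepth 8192 in
theorem pvChain_eq (s : String) :
    (if PySem.Str.startswith (PySem.Str.lower s) "my " then PySem.Str.slice s (some 3) none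
    else if PySem.Str.startswith (PySem.Str.lower s) "the " then PySem.Str.slice s (some 4) none
    else if PySem.Str.startswith (PySem.Str.lower s) "a " then PySem.Str.slice s (some 2) none
    else if PySem.Str.startswith (PySem.Str.lower s) "an " then PySem.Str.slice s (some 3) none
    else if PySem.Str.startswith (PySem.Str.lower s) "this " then PySem.Str.slice s (some 5) none
    else if PySem.Str.startswith (PySem.Str.lower s) "that " then PySem.Str.slice s (some 5) none
    else if PySem.Str.startswith (PySem.Str.lower s) "these " then PySem.Str.slice s (some 6) none
    else if PySem.Str.startswith (PySem.Str.lower s) "those " then PySem.Str.slice s (some 6) none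
    else s) =
    (if PySem.Str.find s " " != -1 &&
        PySem.Set.contains pvDets (PySem.Str.lower (PySem.Str.slice s none (some (PySem.Str.find s " ")))) then
      PySem.Str.slice s (some (PySem.Str.find s " " + 1)) none
    else s) := by
  have hfc : PySem.Str.find s " " = PySem.Chars.find s.toList [' '] := by
    rw [PySem.Str.find_eq, show (" " : String).toList = [' '] from by decide]
  by_cases hneg : PySem.Str.find s " " = -1
  · -- no space in the stripped text: every test of A and B's guard are false
    have hsp : (' ' : Char) ∉ s.toList := by
      rw [pvMem_iff_singleton_infix]
      exact (PySem.Chars.find_eq_neg_one_iff _ _).mp (hfc ▸ hneg)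
    have c1 : PySem.Str.startswith (PySem.Str.lower s) "my " = false := by
      rw [PySem.Str.startswith_eq, PySem.Str.toList_lower,
          show ("my " : String).toList = ['m','y'] ++ [' '] from by decide]
      exact pvStartswith_det_none s.toList ['m','y'] hsp
    have c2 : PySem.Str.startswith (PySem.Str.lower s) "the " = false := by
      rw [PySem.Str.startswith_eq, PySem.Str.toList_lower,
          show ("the " : String).toList = ['t','h','e'] ++ [' '] from by decide]
      exact pvStartswith_det_none s.toList ['t','h','e'] hsp
    have c3 : PySem.Str.startswith (PySem.Str.lower s) "a " = false := by
      rw [PySem.Str.startswith_eq, PySem.Str.toList_lower,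
          show ("a " : String).toList = ['a'] ++ [' '] from by decide]
      exact pvStartswith_det_none s.toList ['a'] hsp
    have c4 : PySem.Str.startswith (PySem.Str.lower s) "an " = false := by
      rw [PySem.Str.startswith_eq, PySem.Str.toList_lower,
          show ("an " : String).toList = ['a','n'] ++ [' '] from by decide]
      exact pvStartswith_det_none s.toList ['a','n'] hsp
    have c5 : PySem.Str.startswith (PySem.Str.lower s) "this " = false := by
      rw [PySem.Str.startswith_eq, PySem.Str.toList_lower,
          show ("this " : String).toList = ['t','h','i','s'] ++ [' '] from by decide]
      exact pvStartswith_det_none s.toList ['t','h','i','s'] hsp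
    have c6 : PySem.Str.startswith (PySem.Str.lower s) "that " = false := by
      rw [PySem.Str.startswith_eq, PySem.Str.toList_lower,
          show ("that " : String).toList = ['t','h','a','t'] ++ [' '] from by decide]
      exact pvStartswith_det_none s.toList ['t','h','a','t'] hsp
    have c7 : PySem.Str.startswith (PySem.Str.lower s) "these " = false := by
      rw [PySem.Str.startswith_eq, PySem.Str.toList_lower,
          show ("these " : String).toList = ['t','h','e','s','e'] ++ [' '] from by decide]
      exact pvStartswith_det_none s.toList ['t','h','e','s','e'] hsp
    have c8 : PySem.Str.startswith (PySem.Str.lower s) "those " = false := by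
      rw [PySem.Str.startswith_eq, PySem.Str.toList_lower,
          show ("those " : String).toList = ['t','h','o','s','e'] ++ [' '] from by decide]
      exact pvStartswith_det_none s.toList ['t','h','o','s','e'] hsp
    rw [c1, c2, c3, c4, c5, c6, c7, c8, hneg]
    simp
  · -- the stripped text has a space, first one at index n
    have hpos : 0 ≤ PySem.Chars.find s.toList [' '] := by
      have := PySem.Chars.neg_one_le_find s.toList [' ']
      rw [hfc] at hneg
      omega
    set n := (PySem.Chars.find s.toList [' ']).toNat with hndef
    have hfn : PySem.Str.find s " " = (n : Int) := by
      rw [hfc, hndef, Int.toNat_of_nonneg hpos]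
    obtain ⟨hpre, hminp⟩ := PySem.Chars.find_spec hpos
    have hn : s.toList[n]? = some ' ' := by
      have := (pvSingleton_prefix_iff ' ' _).mp hpre
      simpa using this
    have hmin : ∀ i, i < n → s.toList[i]? ≠ some ' ' := by
      intro i hi hspi
      exact hminp i hi ((pvSingleton_prefix_iff ' ' _).mpr (by simpa using hspi))
    have hc1 := pvStartswith_det_iff s.toList ['m','y'] (by simp) n hn hmin
    have hc2 := pvStartswith_det_iff s.toList ['t','h','e'] (by simp) n hn hmin
    have hc3 := pvStartswith_det_iff s.toList ['a'] (by simp) n hn hmin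
    have hc4 := pvStartswith_det_iff s.toList ['a','n'] (by simp) n hn hmin
    have hc5 := pvStartswith_det_iff s.toList ['t','h','i','s'] (by simp) n hn hmin
    have hc6 := pvStartswith_det_iff s.toList ['t','h','a','t'] (by simp) n hn hmin
    have hc7 := pvStartswith_det_iff s.toList ['t','h','e','s','e'] (by simp) n hn hmin
    have hc8 := pvStartswith_det_iff s.toList ['t','h','o','s','e'] (by simp) n hn hmin
    -- B's extracted token, on the list side
    have htok : (PySem.Str.lower (PySem.Str.slice s none (some (PySem.Str.find s " ")))).toList
        = PySem.Chars.lower (s.toList.take n) := by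
      rw [PySem.Str.toList_lower, PySem.Str.toList_slice, PySem.Chars.slice_eq_listSlice,
        hfn, PySem.List.slice_to _ (by positivity)]
      simp
    have hbw : ∀ w : String, (PySem.Str.lower (PySem.Str.slice s none (some (PySem.Str.find s " ")))) = w
        ↔ PySem.Chars.lower (s.toList.take n) = w.toList := by
      intro w
      rw [← String.toList_inj, htok]
    have hguard : (PySem.Str.find s " " != -1) = true := by
      rw [hfn, bne_iff_ne]
      intro h
      omega
    -- rewrite every branch condition to a statement about the token, then case on the token
    have S1 : PySem.Str.startswith (PySem.Str.lower s) "my " = true ↔ PySem.Chars.lower (s.toList.take n) = ['m','y'] := by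
      rw [PySem.Str.startswith_eq, PySem.Str.toList_lower,
          show ("my " : String).toList = ['m','y'] ++ [' '] from by decide]
      exact hc1.1
    have S2 : PySem.Str.startswith (PySem.Str.lower s) "the " = true ↔ PySem.Chars.lower (s.toList.take n) = ['t','h','e'] := by
      rw [PySem.Str.startswith_eq, PySem.Str.toList_lower,
          show ("the " : String).toList = ['t','h','e'] ++ [' '] from by decide]
      exact hc2.1
    have S3 : PySem.Str.startswith (PySem.Str.lower s) "a " = true ↔ PySem.Chars.lower (s.toList.take n) = ['a'] := by
      rw [PySem.Str.startswith_eq, PySem.Str.toList_lower,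
          show ("a " : String).toList = ['a'] ++ [' '] from by decide]
      exact hc3.1
    have S4 : PySem.Str.startswith (PySem.Str.lower s) "an " = true ↔ PySem.Chars.lower (s.toList.take n) = ['a','n'] := by
      rw [PySem.Str.startswith_eq, PySem.Str.toList_lower,
          show ("an " : String).toList = ['a','n'] ++ [' '] from by decide]
      exact hc4.1
    have S5 : PySem.Str.startswith (PySem.Str.lower s) "this " = true ↔ PySem.Chars.lower (s.toList.take n) = ['t','h','i','s'] := by
      rw [PySem.Str.startswith_eq, PySem.Str.toList_lower,
          show ("this " : String).toList = ['t','h','i','s'] ++ [' '] from by decide]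
      exact hc5.1
    have S6 : PySem.Str.startswith (PySem.Str.lower s) "that " = true ↔ PySem.Chars.lower (s.toList.take n) = ['t','h','a','t'] := by
      rw [PySem.Str.startswith_eq, PySem.Str.toList_lower,
          show ("that " : String).toList = ['t','h','a','t'] ++ [' '] from by decide]
      exact hc6.1
    have S7 : PySem.Str.startswith (PySem.Str.lower s) "these " = true ↔ PySem.Chars.lower (s.toList.take n) = ['t','h','e','s','e'] := by
      rw [PySem.Str.startswith_eq, PySem.Str.toList_lower,
          show ("these " : String).toList = ['t','h','e','s','e'] ++ [' '] from by decide]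
      exact hc7.1
    have S8 : PySem.Str.startswith (PySem.Str.lower s) "those " = true ↔ PySem.Chars.lower (s.toList.take n) = ['t','h','o','s','e'] := by
      rw [PySem.Str.startswith_eq, PySem.Str.toList_lower,
          show ("those " : String).toList = ['t','h','o','s','e'] ++ [' '] from by decide]
      exact hc8.1
    by_cases e1 : PySem.Chars.lower (s.toList.take n) = ['m','y']
    · have hT : (PySem.Str.lower (PySem.Str.slice s none (some (PySem.Str.find s " ")))) = "my" := (hbw "my").mpr (by rw [show ("my" : String).toList = ['m','y'] from by decide]; exact e1)
      have gtrue : ((PySem.Str.find s " " != -1) && PySem.Set.contains pvDets (PySem.Str.lower (PySem.Str.slice s none (some (PySem.Str.find s " "))))) = true := by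
        rw [hT, hguard]; decide
      rw [S1.mpr e1, gtrue, hfn, hc1.2 e1]
      norm_num
    by_cases e2 : PySem.Chars.lower (s.toList.take n) = ['t','h','e']
    · have hT : (PySem.Str.lower (PySem.Str.slice s none (some (PySem.Str.find s " ")))) = "the" := (hbw "the").mpr (by rw [show ("the" : String).toList = ['t','h','e'] from by decide]; exact e2)
      have gtrue : ((PySem.Str.find s " " != -1) && PySem.Set.contains pvDets (PySem.Str.lower (PySem.Str.slice s none (some (PySem.Str.find s " "))))) = true := by
        rw [hT, hguard]; decide
      have bf1 : PySem.Str.startswith (PySem.Str.lower s) "my " = false := Bool.eq_false_iff.mpr (fun h => e1 (S1.mp h))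
      rw [bf1, S2.mpr e2, gtrue, hfn, hc2.2 e2]
      norm_num
    by_cases e3 : PySem.Chars.lower (s.toList.take n) = ['a']
    · have hT : (PySem.Str.lower (PySem.Str.slice s none (some (PySem.Str.find s " ")))) = "a" := (hbw "a").mpr (by rw [show ("a" : String).toList = ['a'] from by decide]; exact e3)
      have gtrue : ((PySem.Str.find s " " != -1) && PySem.Set.contains pvDets (PySem.Str.lower (PySem.Str.slice s none (some (PySem.Str.find s " "))))) = true := by
        rw [hT, hguard]; decide
      have bf1 : PySem.Str.startswith (PySem.Str.lower s) "my " = false := Bool.eq_false_iff.mpr (fun h => e1 (S1.mp h))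
      have bf2 : PySem.Str.startswith (PySem.Str.lower s) "the " = false := Bool.eq_false_iff.mpr (fun h => e2 (S2.mp h))
      rw [bf1, bf2, S3.mpr e3, gtrue, hfn, hc3.2 e3]
      norm_num
    by_cases e4 : PySem.Chars.lower (s.toList.take n) = ['a','n']
    · have hT : (PySem.Str.lower (PySem.Str.slice s none (some (PySem.Str.find s " ")))) = "an" := (hbw "an").mpr (by rw [show ("an" : String).toList = ['a','n'] from by decide]; exact e4)
      have gtrue : ((PySem.Str.find s " " != -1) && PySem.Set.contains pvDets (PySem.Str.lower (PySem.Str.slice s none (some (PySem.Str.find s " "))))) = true := by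
        rw [hT, hguard]; decide
      have bf1 : PySem.Str.startswith (PySem.Str.lower s) "my " = false := Bool.eq_false_iff.mpr (fun h => e1 (S1.mp h))
      have bf2 : PySem.Str.startswith (PySem.Str.lower s) "the " = false := Bool.eq_false_iff.mpr (fun h => e2 (S2.mp h))
      have bf3 : PySem.Str.startswith (PySem.Str.lower s) "a " = false := Bool.eq_false_iff.mpr (fun h => e3 (S3.mp h))
      rw [bf1, bf2, bf3, S4.mpr e4, gtrue, hfn, hc4.2 e4]
      norm_num
    by_cases e5 : PySem.Chars.lower (s.toList.take n) = ['t','h','i','s']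
    · have hT : (PySem.Str.lower (PySem.Str.slice s none (some (PySem.Str.find s " ")))) = "this" := (hbw "this").mpr (by rw [show ("this" : String).toList = ['t','h','i','s'] from by decide]; exact e5)
      have gtrue : ((PySem.Str.find s " " != -1) && PySem.Set.contains pvDets (PySem.Str.lower (PySem.Str.slice s none (some (PySem.Str.find s " "))))) = true := by
        rw [hT, hguard]; decide
      have bf1 : PySem.Str.startswith (PySem.Str.lower s) "my " = false := Bool.eq_false_iff.mpr (fun h => e1 (S1.mp h))
      have bf2 : PySem.Str.startswith (PySem.Str.lower s) "the " = false := Bool.eq_false_iff.mpr (fun h => e2 (S2.mp h))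
      have bf3 : PySem.Str.startswith (PySem.Str.lower s) "a " = false := Bool.eq_false_iff.mpr (fun h => e3 (S3.mp h))
      have bf4 : PySem.Str.startswith (PySem.Str.lower s) "an " = false := Bool.eq_false_iff.mpr (fun h => e4 (S4.mp h))
      rw [bf1, bf2, bf3, bf4, S5.mpr e5, gtrue, hfn, hc5.2 e5]
      norm_num
    by_cases e6 : PySem.Chars.lower (s.toList.take n) = ['t','h','a','t']
    · have hT : (PySem.Str.lower (PySem.Str.slice s none (some (PySem.Str.find s " ")))) = "that" := (hbw "that").mpr (by rw [show ("that" : String).toList = ['t','h','a','t'] from by decide]; exact e6)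
      have gtrue : ((PySem.Str.find s " " != -1) && PySem.Set.contains pvDets (PySem.Str.lower (PySem.Str.slice s none (some (PySem.Str.find s " "))))) = true := by
        rw [hT, hguard]; decide
      have bf1 : PySem.Str.startswith (PySem.Str.lower s) "my " = false := Bool.eq_false_iff.mpr (fun h => e1 (S1.mp h))
      have bf2 : PySem.Str.startswith (PySem.Str.lower s) "the " = false := Bool.eq_false_iff.mpr (fun h => e2 (S2.mp h))
      have bf3 : PySem.Str.startswith (PySem.Str.lower s) "a " = false := Bool.eq_false_iff.mpr (fun h => e3 (S3.mp h))
      have bf4 : PySem.Str.startswith (PySem.Str.lower s) "an " = false := Bool.eq_false_iff.mpr (fun h => e4 (S4.mp h))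
      have bf5 : PySem.Str.startswith (PySem.Str.lower s) "this " = false := Bool.eq_false_iff.mpr (fun h => e5 (S5.mp h))
      rw [bf1, bf2, bf3, bf4, bf5, S6.mpr e6, gtrue, hfn, hc6.2 e6]
      norm_num
    by_cases e7 : PySem.Chars.lower (s.toList.take n) = ['t','h','e','s','e']
    · have hT : (PySem.Str.lower (PySem.Str.slice s none (some (PySem.Str.find s " ")))) = "these" := (hbw "these").mpr (by rw [show ("these" : String).toList = ['t','h','e','s','e'] from by decide]; exact e7)
      have gtrue : ((PySem.Str.find s " " != -1) && PySem.Set.contains pvDets (PySem.Str.lower (PySem.Str.slice s none (some (PySem.Str.find s " "))))) = true := by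
        rw [hT, hguard]; decide
      have bf1 : PySem.Str.startswith (PySem.Str.lower s) "my " = false := Bool.eq_false_iff.mpr (fun h => e1 (S1.mp h))
      have bf2 : PySem.Str.startswith (PySem.Str.lower s) "the " = false := Bool.eq_false_iff.mpr (fun h => e2 (S2.mp h))
      have bf3 : PySem.Str.startswith (PySem.Str.lower s) "a " = false := Bool.eq_false_iff.mpr (fun h => e3 (S3.mp h))
      have bf4 : PySem.Str.startswith (PySem.Str.lower s) "an " = false := Bool.eq_false_iff.mpr (fun h => e4 (S4.mp h))
      have bf5 : PySem.Str.startswith (PySem.Str.lower s) "this " = false := Bool.eq_false_iff.mpr (fun h => e5 (S5.mp h))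
      have bf6 : PySem.Str.startswith (PySem.Str.lower s) "that " = false := Bool.eq_false_iff.mpr (fun h => e6 (S6.mp h))
      rw [bf1, bf2, bf3, bf4, bf5, bf6, S7.mpr e7, gtrue, hfn, hc7.2 e7]
      norm_num
    by_cases e8 : PySem.Chars.lower (s.toList.take n) = ['t','h','o','s','e']
    · have hT : (PySem.Str.lower (PySem.Str.slice s none (some (PySem.Str.find s " ")))) = "those" := (hbw "those").mpr (by rw [show ("those" : String).toList = ['t','h','o','s','e'] from by decide]; exact e8)
      have gtrue : ((PySem.Str.find s " " != -1) && PySem.Set.contains pvDets (PySem.Str.lower (PySem.Str.slice s none (some (PySem.Str.find s " "))))) = true := by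
        rw [hT, hguard]; decide
      have bf1 : PySem.Str.startswith (PySem.Str.lower s) "my " = false := Bool.eq_false_iff.mpr (fun h => e1 (S1.mp h))
      have bf2 : PySem.Str.startswith (PySem.Str.lower s) "the " = false := Bool.eq_false_iff.mpr (fun h => e2 (S2.mp h))
      have bf3 : PySem.Str.startswith (PySem.Str.lower s) "a " = false := Bool.eq_false_iff.mpr (fun h => e3 (S3.mp h))
      have bf4 : PySem.Str.startswith (PySem.Str.lower s) "an " = false := Bool.eq_false_iff.mpr (fun h => e4 (S4.mp h))
      have bf5 : PySem.Str.startswith (PySem.Str.lower s) "this " = false := Bool.eq_false_iff.mpr (fun h => e5 (S5.mp h))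
      have bf6 : PySem.Str.startswith (PySem.Str.lower s) "that " = false := Bool.eq_false_iff.mpr (fun h => e6 (S6.mp h))
      have bf7 : PySem.Str.startswith (PySem.Str.lower s) "these " = false := Bool.eq_false_iff.mpr (fun h => e7 (S7.mp h))
      rw [bf1, bf2, bf3, bf4, bf5, bf6, bf7, S8.mpr e8, gtrue, hfn, hc8.2 e8]
      norm_num
    have bf1 : PySem.Str.startswith (PySem.Str.lower s) "my " = false := Bool.eq_false_iff.mpr (fun h => e1 (S1.mp h))
    have d1 : (PySem.Str.lower (PySem.Str.slice s none (some (PySem.Str.find s " ")))) ≠ "my" := fun h => e1 (by have := (hbw "my").mp h; rwa [show ("my" : String).toList = ['m','y'] from by decide] at this)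
    have bf2 : PySem.Str.startswith (PySem.Str.lower s) "the " = false := Bool.eq_false_iff.mpr (fun h => e2 (S2.mp h))
    have d2 : (PySem.Str.lower (PySem.Str.slice s none (some (PySem.Str.find s " ")))) ≠ "the" := fun h => e2 (by have := (hbw "the").mp h; rwa [show ("the" : String).toList = ['t','h','e'] from by decide] at this)
    have bf3 : PySem.Str.startswith (PySem.Str.lower s) "a " = false := Bool.eq_false_iff.mpr (fun h => e3 (S3.mp h))
    have d3 : (PySem.Str.lower (PySem.Str.slice s none (some (PySem.Str.find s " ")))) ≠ "a" := fun h => e3 (by have := (hbw "a").mp h; rwa [show ("a" : String).toList = ['a'] from by decide] at this)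
    have bf4 : PySem.Str.startswith (PySem.Str.lower s) "an " = false := Bool.eq_false_iff.mpr (fun h => e4 (S4.mp h))
    have d4 : (PySem.Str.lower (PySem.Str.slice s none (some (PySem.Str.find s " ")))) ≠ "an" := fun h => e4 (by have := (hbw "an").mp h; rwa [show ("an" : String).toList = ['a','n'] from by decide] at this)
    have bf5 : PySem.Str.startswith (PySem.Str.lower s) "this " = false := Bool.eq_false_iff.mpr (fun h => e5 (S5.mp h))
    have d5 : (PySem.Str.lower (PySem.Str.slice s none (some (PySem.Str.find s " ")))) ≠ "this" := fun h => e5 (by have := (hbw "this").mp h; rwa [show ("this" : String).toList = ['t','h','i','s'] from by decide] at this)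
    have bf6 : PySem.Str.startswith (PySem.Str.lower s) "that " = false := Bool.eq_false_iff.mpr (fun h => e6 (S6.mp h))
    have d6 : (PySem.Str.lower (PySem.Str.slice s none (some (PySem.Str.find s " ")))) ≠ "that" := fun h => e6 (by have := (hbw "that").mp h; rwa [show ("that" : String).toList = ['t','h','a','t'] from by decide] at this)
    have bf7 : PySem.Str.startswith (PySem.Str.lower s) "these " = false := Bool.eq_false_iff.mpr (fun h => e7 (S7.mp h))
    have d7 : (PySem.Str.lower (PySem.Str.slice s none (some (PySem.Str.find s " ")))) ≠ "these" := fun h => e7 (by have := (hbw "these").mp h; rwa [show ("these" : String).toList = ['t','h','e','s','e'] from by decide] at this)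
    have bf8 : PySem.Str.startswith (PySem.Str.lower s) "those " = false := Bool.eq_false_iff.mpr (fun h => e8 (S8.mp h))
    have d8 : (PySem.Str.lower (PySem.Str.slice s none (some (PySem.Str.find s " ")))) ≠ "those" := fun h => e8 (by have := (hbw "those").mp h; rwa [show ("those" : String).toList = ['t','h','o','s','e'] from by decide] at this)
    rw [hfc] at d1 d2 d3 d4 d5 d6 d7 d8
    have gfalse : ((PySem.Str.find s " " != -1) && PySem.Set.contains pvDets (PySem.Str.lower (PySem.Str.slice s none (some (PySem.Str.find s " "))))) = false := by
      simp only [hguard, Bool.true_and]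
      simp [pvDets, PySem.Set.contains, PySem.Set.ofList, PySem.Set.add, PySem.Set.empty]
      exact ⟨d1, d2, d3, d4, d5, d6, d7, d8⟩
    rw [bf1, bf2, bf3, bf4, bf5, bf6, bf7, bf8, gfalse]
    simp

theorem pvMain (text : String) : clean_np_py text = clean_np_py_alt text := by
  by_cases h0 : text = ""
  · subst h0; rfl
  · unfold clean_np_py clean_np_py_alt
    rw [if_neg (by simpa using h0)]
    exact pvChain_eq (PySem.Str.strip text)

-- ===== VERDICT (by name: the statement is the Claim_ definition above) =====
theorem clean_np_py_spec : Claim_equal_clean_np_py := by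
  intro text _
  unfold Spec_clean_np_py
  exact pvMain text
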